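-- pv_equiv track=rewrite | github.com/kkchx/practice_project | history/archive/04_BubbleSort_Modify.py | find_duplicates
-- ===== SOURCE A (Python) =====
-- def find_duplicates(arr):
--     dup_list=[0]
--     counter=0
--     for i in range(len(arr)-1):
--         if arr[i]==arr[i+1] and arr[i]!=dup_list[counter]:
--             dup_list.append(arr[i])
--             counter+=1
--     return counter
-- ===== SOURCE B (Python) =====
-- def find_duplicates(arr):
--     counter = 0
--     prev = 0
--     n = len(arr)
--     i = 0
--     while i < n:
--         j = i + 1
--         while j < n and arr[j] == arr[i]:
--             j += 1
--         if j - i >= 2 and arr[i] != prev: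
--             counter += 1
--             prev = arr[i]
--         i = j
--     return counter
-- ===== Notes on version B (the rewrite author's own statement) =====
-- stated objective: alternative
-- what changed: Replaces A's adjacent-pair index loop with a dup_list accumulator by a run-based scan: advance over each maximal run of equal values, count runs of length >= 2 whose value differs from the previously counted one (seeded 0, matching A's sentinel), keeping only a counter and the previous counted value.
import Mathlib
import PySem

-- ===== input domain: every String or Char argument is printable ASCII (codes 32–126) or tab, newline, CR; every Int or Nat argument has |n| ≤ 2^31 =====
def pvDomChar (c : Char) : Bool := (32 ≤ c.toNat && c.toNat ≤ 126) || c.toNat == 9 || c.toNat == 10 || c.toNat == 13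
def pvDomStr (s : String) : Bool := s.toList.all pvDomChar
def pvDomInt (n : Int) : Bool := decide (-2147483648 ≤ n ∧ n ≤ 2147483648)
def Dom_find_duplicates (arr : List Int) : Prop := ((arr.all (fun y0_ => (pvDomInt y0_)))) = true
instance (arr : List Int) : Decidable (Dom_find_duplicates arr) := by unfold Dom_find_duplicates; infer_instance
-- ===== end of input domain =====

-- B replaces A's adjacent-pair loop (with its growing dup_list) by a run-based O(1)-space scan; same return value everywhere.

-- ===== PORT A =====
-- loop body of A: arr[i]==arr[i+1] and arr[i]!=dup_list[counter] (all lookups in range on every reached iteration;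
-- the fallback branch returning s unchanged is unreachable and only totalizes the match)
def stepA (arr : List Int) (s : List Int × Int) (i : Int) : List Int × Int :=
  match PySem.List.pyGet? arr i, PySem.List.pyGet? arr (i + 1), PySem.List.pyGet? s.1 s.2 with
  | some a, some b, some d => if a = b ∧ a ≠ d then (s.1 ++ [a], s.2 + 1) else s
  | _, _, _ => s

def find_duplicates (arr : List Int) : Int :=
  ((PySem.List.pyRange 0 ((arr.length : Int) - 1) 1).foldl (stepA arr) ([0], 0)).2

-- ===== PORT B =====
-- while-loop of Source B: each step consumes one maximal run x :: takeWhile (·==x) and advances to the rest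
def altRun (arr : List Int) (counter prev : Int) : Int :=
  match arr with
  | [] => counter
  | x :: xs =>
    let run := xs.takeWhile (fun y => y == x)
    let rest := xs.dropWhile (fun y => y == x)
    if run.length + 1 ≥ 2 ∧ x ≠ prev then altRun rest (counter + 1) x
    else altRun rest counter prev
termination_by arr.length
decreasing_by
  · simpa using Nat.lt_succ_of_le (List.length_dropWhile_le _ xs)
  · simpa using Nat.lt_succ_of_le (List.length_dropWhile_le _ xs)

def find_duplicates_alt (arr : List Int) : Int := altRun arr 0 0

-- ===== PRECONDITION & SPEC =====
def Spec_find_duplicates (arr : List Int) (out : Int) : Prop := out = find_duplicates_alt arr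
instance (arr : List Int) (out : Int) : Decidable (Spec_find_duplicates arr out) := by unfold Spec_find_duplicates; infer_instance

-- ===== CLAIM (what is proved, stated in full; the proofs are below) =====
def Claim_equal_find_duplicates : Prop := ∀ (arr : List Int), Dom_find_duplicates arr → Spec_find_duplicates arr (find_duplicates arr)

-- ===== LEMMAS AND PROOFS =====

-- reference recursion: count of adjacent-equal runs, skipping value p, updating p only on a counted run
def go (p : Int) : List Int → Int
  | x :: y :: r => if x = y ∧ x ≠ p then 1 + go x (y :: r) else go p (y :: r)
  | _ => 0

lemma go_cons_cons (p x y : Int) (r : List Int) :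
    go p (x :: y :: r) = if x = y ∧ x ≠ p then 1 + go x (y :: r) else go p (y :: r) := by
  simp [go]

lemma head?_dropWhile_ne (x : Int) : ∀ xs : List Int,
    (xs.dropWhile (fun y => y == x)).head? ≠ some x
  | [] => by simp
  | y :: ys => by
    by_cases h : y = x
    · simpa [List.dropWhile_cons, h] using head?_dropWhile_ne x ys
    · simp [h]

lemma go_run (k : Nat) (x p : Int) (rest : List Int) (hrest : rest.head? ≠ some x) :
    go p (x :: List.replicate k x ++ rest) =
      if 0 < k ∧ x ≠ p then 1 + go x rest else go p rest := by
  induction k generalizing p with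
  | zero =>
    cases rest with
    | nil => simp [go]
    | cons y r =>
      have hxy : x ≠ y := by
        intro h; rw [h] at hrest; simp at hrest
      simp [go_cons_cons, hxy]
  | succ k ih =>
    rw [show x :: List.replicate (k+1) x ++ rest = x :: x :: (List.replicate k x ++ rest) by
      simp [List.replicate_succ]]
    rw [go_cons_cons]
    rw [show x :: (List.replicate k x ++ rest) = x :: List.replicate k x ++ rest by simp]
    by_cases hp : x = p
    · rw [if_neg (by tauto), ih p, if_neg (by tauto), if_neg (by tauto)]
    · rw [if_pos ⟨rfl, hp⟩, ih x, if_neg (by simp), if_pos ⟨Nat.succ_pos k, hp⟩]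

lemma altRun_cons (x : Int) (xs : List Int) (c p : Int) :
    altRun (x :: xs) c p =
      if (xs.takeWhile (fun y => y == x)).length + 1 ≥ 2 ∧ x ≠ p
      then altRun (xs.dropWhile (fun y => y == x)) (c + 1) x
      else altRun (xs.dropWhile (fun y => y == x)) c p := by
  rw [altRun]

lemma altRun_eq (l : List Int) (c p : Int) : altRun l c p = c + go p l := by
  induction hn : l.length using Nat.strong_induction_on generalizing l c p with
  | _ n ih =>
    cases l with
    | nil => simp [altRun, go]
    | cons x xs =>
      have hrep : xs.takeWhile (fun y => y == x) =
          List.replicate (xs.takeWhile (fun y => y == x)).length x := by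
        apply List.eq_replicate_of_mem
        intro y hy
        simpa using List.mem_takeWhile_imp hy
      have hxs : xs = List.replicate (xs.takeWhile (fun y => y == x)).length x ++
          xs.dropWhile (fun y => y == x) := by
        conv_lhs => rw [← List.takeWhile_append_dropWhile (p := fun y => y == x) (l := xs)]
        rw [← hrep]
      have hgo : go p (x :: xs) =
          if 0 < (xs.takeWhile (fun y => y == x)).length ∧ x ≠ p
          then 1 + go x (xs.dropWhile (fun y => y == x))
          else go p (xs.dropWhile (fun y => y == x)) := by
        conv_lhs => rw [hxs]
        exact go_run _ x p _ (head?_dropWhile_ne x xs)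
      have hlen : (xs.dropWhile (fun y => y == x)).length < n := by
        subst hn
        exact Nat.lt_succ_of_le (List.length_dropWhile_le _ xs)
      rw [altRun_cons, hgo]
      by_cases hc : (xs.takeWhile (fun y => y == x)).length + 1 ≥ 2 ∧ x ≠ p
      · rw [if_pos hc, if_pos ⟨by omega, hc.2⟩, ih _ hlen _ _ _ rfl]
        ring
      · rw [if_neg hc, if_neg (by rintro ⟨h1, h2⟩; exact hc ⟨by omega, h2⟩),
          ih _ hlen _ _ _ rfl]

lemma A_loop (t : List Int) : ∀ (arr : List Int) (j : Nat) (l : List Int) (v : Int),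
    arr.drop j = t → l.getLast? = some v →
    ((PySem.List.pyRange (j : Int) ((arr.length : Int) - 1) 1).foldl (stepA arr)
        (l, (l.length : Int) - 1)).2 = ((l.length : Int) - 1) + go v t := by
  induction t with
  | nil =>
    intro arr j l v hdrop _
    have hj : arr.length ≤ j := by
      have := congrArg List.length hdrop
      simp at this; omega
    rw [PySem.List.pyRange_one_eq_nil (by omega)]
    simp [go]
  | cons x t ih =>
    intro arr j l v hdrop hlast
    cases t with
    | nil =>
      have hj : arr.length = j + 1 := by
        have := congrArg List.length hdrop
        simp at this; omega
      rw [PySem.List.pyRange_one_eq_nil (by omega)]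
      simp [go]
    | cons y r =>
      have hlen : j + 2 ≤ arr.length := by
        have := congrArg List.length hdrop
        simp at this; omega
      have hx : arr[j]? = some x := by
        have h0 : (arr.drop j)[0]? = some x := by rw [hdrop]; rfl
        simpa using h0
      have hy : arr[j+1]? = some y := by
        have h1 : (arr.drop j)[1]? = some y := by rw [hdrop]; rfl
        simpa using h1
      have hlne : l ≠ [] := by intro h; rw [h] at hlast; simp at hlast
      have hl1 : 1 ≤ l.length := List.length_pos_iff.mpr hlne
      have hld : PySem.List.pyGet? l ((l.length : Int) - 1) = some v := by
        rw [show ((l.length : Int) - 1) = ((l.length - 1 : Nat) : Int) by push_cast [hl1]; omega]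
        rw [PySem.List.pyGet?_natCast]
        rw [← hlast, List.getLast?_eq_getElem?]
      rw [PySem.List.pyRange_one_cons (by omega)]
      rw [List.foldl_cons]
      have hstep : stepA arr (l, (l.length : Int) - 1) (j : Int) =
          if x = y ∧ x ≠ v then (l ++ [x], ((l.length : Int) - 1) + 1)
          else (l, (l.length : Int) - 1) := by
        unfold stepA
        have h1 : PySem.List.pyGet? arr (j : Int) = some x := by
          rw [PySem.List.pyGet?_natCast]; exact hx
        have h2 : PySem.List.pyGet? arr ((j : Int) + 1) = some y := by
          rw [show ((j : Int) + 1) = ((j + 1 : Nat) : Int) by push_cast; ring]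
          rw [PySem.List.pyGet?_natCast]; exact hy
        rw [h1, h2, hld]
      have hdrop2 : arr.drop (j + 1) = y :: r := by
        have h2 := congrArg (List.drop 1) hdrop
        simpa [List.drop_drop, Nat.add_comm] using h2
      have hcast : ((j : Int) + 1) = ((j + 1 : Nat) : Int) := by push_cast; ring
      rw [hstep, go_cons_cons]
      by_cases hc : x = y ∧ x ≠ v
      · rw [if_pos hc, if_pos hc]
        have hlast2 : (l ++ [x]).getLast? = some x := by simp
        have hlen2 : (((l ++ [x]).length : Int) - 1) = ((l.length : Int) - 1) + 1 := by
          simp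
        rw [show (((l.length : Int) - 1) + 1) = (((l ++ [x]).length : Int) - 1) from hlen2.symm]
        rw [hcast, ih arr (j+1) (l ++ [x]) x hdrop2 hlast2, hlen2]
        ring
      · rw [if_neg hc, if_neg hc, hcast, ih arr (j+1) l v hdrop2 hlast]

-- ===== VERDICT (by name: the statement is the Claim_ definition above) =====
theorem find_duplicates_spec : Claim_equal_find_duplicates := by
  intro arr _
  unfold Spec_find_duplicates find_duplicates find_duplicates_alt
  rw [altRun_eq]
  have h := A_loop arr arr 0 [0] 0 (by simp) (by simp)
  simpa using h
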